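-- pv_equiv track=rewrite | github.com/SeleniumK/advent-2016 | day-2.py | bathroom_code
-- ===== SOURCE A (Python) =====
-- def bathroom_code(instructions):
--     keypad = [
--         [None, None, 1, None, None],
--         [None, 2, 3, 4, None],
--         [5, 6, 7, 8, 9],
--         [None, "A", "B", "C", None],
--         [None, None, "D", None, None]
--     ]
--     dirs = {"U": [0, -1], "D": [0, 1], "L": [-1, 0], "R": [1, 0]}
--
--     code = []
--     y, x = 2, 0
--     for number in instructions:
--         for step in number:
--             if (
--                 y + dirs[step][1] in range(len(keypad)) and
--                 x + dirs[step][0] in range(len(keypad)) and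
--                 keypad[y + dirs[step][1]][x + dirs[step][0]]
--             ):
--                     y, x = y + dirs[step][1], x + dirs[step][0]
--         code.append(keypad[y][x])
--     return "Bathroom Code: {}".format("".join(map(str, code)))
-- ===== SOURCE B (Python) =====
-- def bathroom_code(instructions):
--     keypad = [
--         [None, None, "1", None, None],
--         [None, "2", "3", "4", None],
--         ["5", "6", "7", "8", "9"],
--         [None, "A", "B", "C", None],
--         [None, None, "D", None, None],
--     ]
--     moves = {"U": (0, -1), "D": (0, 1), "L": (-1, 0), "R": (1, 0)}
--     # Build the transition table once: key -> {direction -> next key}.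
--     trans = {}
--     for y, row in enumerate(keypad):
--         for x, key in enumerate(row):
--             if key is None:
--                 continue
--             t = {}
--             for d, (dx, dy) in moves.items():
--                 ny, nx = y + dy, x + dx
--                 if 0 <= ny < 5 and 0 <= nx < 5 and keypad[ny][nx] is not None:
--                     t[d] = keypad[ny][nx]
--                 else:
--                     t[d] = key
--             trans[key] = t
--     cur = "5"
--     out = []
--     for line in instructions:
--         for step in line:
--             cur = trans[cur][step]
--         out.append(cur)
--     return "Bathroom Code: " + "".join(out)
-- ===== Notes on version B (the rewrite author's own statement) =====
-- stated objective: idiomatic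
-- what changed: B precomputes a transition table mapping each key symbol to its neighbour per direction (blocked moves map to the same key) and then simply walks cur = trans[cur][step], instead of doing coordinate arithmetic with bounds checks on every step.
import Mathlib
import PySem

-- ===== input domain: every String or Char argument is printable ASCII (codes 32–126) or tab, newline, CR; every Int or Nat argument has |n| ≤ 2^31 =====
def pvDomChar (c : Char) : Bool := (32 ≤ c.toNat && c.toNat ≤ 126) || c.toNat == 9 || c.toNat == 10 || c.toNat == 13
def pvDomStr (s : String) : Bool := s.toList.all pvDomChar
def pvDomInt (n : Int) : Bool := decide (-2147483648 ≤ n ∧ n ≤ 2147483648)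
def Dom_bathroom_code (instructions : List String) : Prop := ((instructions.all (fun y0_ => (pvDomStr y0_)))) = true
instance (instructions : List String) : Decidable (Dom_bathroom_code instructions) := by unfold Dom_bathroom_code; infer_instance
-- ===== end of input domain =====

-- B replaces per-step coordinate arithmetic with a precomputed key -> direction -> key transition table (idiomatic; same cost).
-- Python ints on the keypad are ported as their str() image (they only ever reach the output through map(str, ...)).

-- ===== PORT A =====
-- keypad cells: None -> none, 1 -> some "1", "A" -> some "A"; the Python truthiness test is isSome (all non-None cells are truthy).
def pvKeypadA : List (List (Option String)) :=
  [[none, none, some "1", none, none],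
   [none, some "2", some "3", some "4", none],
   [some "5", some "6", some "7", some "8", some "9"],
   [none, some "A", some "B", some "C", none],
   [none, none, some "D", none, none]]

def pvDirsA : PySem.Dict Char (Int × Int) :=
  PySem.Dict.ofList [('U', (0, -1)), ('D', (0, 1)), ('L', (-1, 0)), ('R', (1, 0))]

-- keypad[y][x] (indices are checked to lie in range(5) before use; Pre_ guards the dirs lookup)
def pvCellA (y x : Int) : Option String :=
  match PySem.List.pyGet? pvKeypadA y with
  | some row => (PySem.List.pyGet? row x).getD none
  | none => none

def pvStepA (st : Int × Int) (c : Char) : Int × Int :=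
  let d := (pvDirsA.get? c).getD (0, 0)
  let ny := st.1 + d.2
  let nx := st.2 + d.1
  if (0 ≤ ny ∧ ny < 5) ∧ (0 ≤ nx ∧ nx < 5) ∧ (pvCellA ny nx).isSome then (ny, nx) else st

def bathroom_code (instructions : List String) : String :=
  let fin := instructions.foldl
    (fun (st : (Int × Int) × List String) line =>
      let p := line.toList.foldl pvStepA st.1
      (p, st.2 ++ [(pvCellA p.1 p.2).getD ""]))
    ((2, 0), [])
  "Bathroom Code: " ++ PySem.Str.join "" fin.2

-- ===== PORT B =====
def pvKeypadB : List (List (Option String)) :=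
  [[none, none, some "1", none, none],
   [none, some "2", some "3", some "4", none],
   [some "5", some "6", some "7", some "8", some "9"],
   [none, some "A", some "B", some "C", none],
   [none, none, some "D", none, none]]

def pvMovesB : List (Char × (Int × Int)) :=
  [('U', (0, -1)), ('D', (0, 1)), ('L', (-1, 0)), ('R', (1, 0))]

def pvCellB (y x : Int) : Option String :=
  match PySem.List.pyGet? pvKeypadB y with
  | some row => (PySem.List.pyGet? row x).getD none
  | none => none

-- the transition table built once, exactly as Source B builds it
def pvTransB : PySem.Dict String (PySem.Dict Char String) :=
  (PySem.List.enumerate pvKeypadB 0).foldl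
    (fun tr yr =>
      (PySem.List.enumerate yr.2 0).foldl
        (fun tr xc =>
          match xc.2 with
          | none => tr
          | some key =>
            let t := pvMovesB.foldl
              (fun t dm =>
                let ny := yr.1 + dm.2.2
                let nx := xc.1 + dm.2.1
                if 0 ≤ ny ∧ ny < 5 ∧ 0 ≤ nx ∧ nx < 5 ∧ (pvCellB ny nx).isSome then
                  t.insert dm.1 ((pvCellB ny nx).getD key)
                else
                  t.insert dm.1 key)
              PySem.Dict.empty
            tr.insert key t)
        tr)
    PySem.Dict.empty

-- cur = trans[cur][step]; Pre_ guarantees both lookups hit (defaults are never used inside Pre_)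
def pvStepB (cur : String) (c : Char) : String :=
  PySem.Dict.getD ((pvTransB.get? cur).getD PySem.Dict.empty) c ""

def bathroom_code_alt (instructions : List String) : String :=
  let fin := instructions.foldl
    (fun (st : String × List String) line =>
      let cur := line.toList.foldl pvStepB st.1
      (cur, st.2 ++ [cur]))
    ("5", [])
  "Bathroom Code: " ++ PySem.Str.join "" fin.2

-- ===== PRECONDITION & SPEC =====
-- Pre_ excludes instructions containing a character other than U/D/L/R, on which the Python A raises KeyError.
def Pre_bathroom_code (instructions : List String) : Prop :=
  (instructions.all (fun line => line.toList.all
    (fun c => c == 'U' || c == 'D' || c == 'L' || c == 'R'))) = true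
instance (instructions : List String) : Decidable (Pre_bathroom_code instructions) := by
  unfold Pre_bathroom_code; infer_instance

def pvWitness_bathroom_code : List String := ["ULL", "RRDDD", "LURDL", "UUUUD"]

def Spec_bathroom_code (instructions : List String) (out : String) : Prop := out = bathroom_code_alt instructions
instance (instructions : List String) (out : String) : Decidable (Spec_bathroom_code instructions out) := by unfold Spec_bathroom_code; infer_instance

-- ===== CLAIM (what is proved, stated in full; the proofs are below) =====
def Claim_equal_bathroom_code : Prop := ∀ (instructions : List String), Dom_bathroom_code instructions → Pre_bathroom_code instructions → Spec_bathroom_code instructions (bathroom_code instructions)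

-- ===== LEMMAS AND PROOFS =====
-- the 13 reachable (y, x) positions of A's walk
def pvPosL : List (Int × Int) :=
  [(0, 2), (1, 1), (1, 2), (1, 3), (2, 0), (2, 1), (2, 2), (2, 3), (2, 4),
   (3, 1), (3, 2), (3, 3), (4, 2)]

def pvKeyOf (p : Int × Int) : String := (pvCellA p.1 p.2).getD ""

-- per-step agreement, checked over the finite position × direction table
set_option maxRecDepth 4000 in
theorem pv_step_agree : ∀ p ∈ pvPosL, ∀ c ∈ (['U', 'D', 'L', 'R'] : List Char),
    pvStepA p c ∈ pvPosL ∧ pvStepB (pvKeyOf p) c = pvKeyOf (pvStepA p c) := by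
  intro p hp c hc
  simp only [pvPosL, List.mem_cons, List.not_mem_nil, or_false] at hp
  simp only [List.mem_cons, List.not_mem_nil, or_false] at hc
  rcases hp with h | h | h | h | h | h | h | h | h | h | h | h | h <;> subst h <;>
    rcases hc with h | h | h | h <;> subst h <;> exact ⟨by decide, by decide⟩

theorem pv_line_agree (cs : List Char) : ∀ p ∈ pvPosL,
    (∀ c ∈ cs, c = 'U' ∨ c = 'D' ∨ c = 'L' ∨ c = 'R') →
    cs.foldl pvStepA p ∈ pvPosL ∧
      cs.foldl pvStepB (pvKeyOf p) = pvKeyOf (cs.foldl pvStepA p) := by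
  induction cs with
  | nil => intro p hp _; exact ⟨hp, rfl⟩
  | cons c cs ih =>
    intro p hp hcs
    have hc : c ∈ (['U', 'D', 'L', 'R'] : List Char) := by
      rcases hcs c (List.mem_cons_self ..) with h | h | h | h <;> simp [h]
    obtain ⟨hmem, hkey⟩ := pv_step_agree p hp c hc
    have := ih (pvStepA p c) hmem (fun c' hc' => hcs c' (List.mem_cons_of_mem _ hc'))
    simpa [List.foldl_cons, hkey] using this

theorem pv_main (ls : List String) : ∀ (p : Int × Int) (acc : List String), p ∈ pvPosL →
    (∀ line ∈ ls, ∀ c ∈ line.toList, c = 'U' ∨ c = 'D' ∨ c = 'L' ∨ c = 'R') →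
    (ls.foldl (fun (st : (Int × Int) × List String) line =>
        let p := line.toList.foldl pvStepA st.1
        (p, st.2 ++ [(pvCellA p.1 p.2).getD ""])) (p, acc)).2 =
      (ls.foldl (fun (st : String × List String) line =>
        let cur := line.toList.foldl pvStepB st.1
        (cur, st.2 ++ [cur])) (pvKeyOf p, acc)).2 := by
  induction ls with
  | nil => intro p acc _ _; rfl
  | cons l ls ih =>
    intro p acc hp hpre
    obtain ⟨hmem, hkey⟩ := pv_line_agree l.toList p hp (hpre l (List.mem_cons_self ..))
    have := ih (l.toList.foldl pvStepA p) (acc ++ [pvKeyOf (l.toList.foldl pvStepA p)]) hmem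
      (fun l' hl' => hpre l' (List.mem_cons_of_mem _ hl'))
    simp only [List.foldl_cons]
    rw [hkey]
    exact this

-- ===== VERDICT (by name: the statement is the Claim_ definition above) =====
theorem bathroom_code_spec : Claim_equal_bathroom_code := by
  intro instructions _ hpre
  unfold Spec_bathroom_code bathroom_code bathroom_code_alt
  have hpre' : ∀ line ∈ instructions, ∀ c ∈ line.toList,
      c = 'U' ∨ c = 'D' ∨ c = 'L' ∨ c = 'R' := by
    simp only [Pre_bathroom_code, List.all_eq_true, Bool.or_eq_true, beq_iff_eq] at hpre
    intro l hl c hc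
    rcases hpre l hl c hc with ((h | h) | h) | h <;> tauto
  have h := pv_main instructions (2, 0) [] (by decide) hpre'
  have hk : pvKeyOf ((2 : Int), (0 : Int)) = "5" := by decide
  rw [hk] at h
  simp only [h]
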